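-- pv_equiv track=rewrite | github.com/mitch9727/mksap | statement_generator/src/processing/statements/validators/ambiguity.py | find_similar_cloze_pairs
-- ===== SOURCE A (Python) =====
-- from typing import Dict, List, Optional, Set
--
-- def find_similar_cloze_pairs(candidates: List[str]) -> List[tuple]:
--     """
--     Find pairs of cloze candidates that are similar (same prefix/suffix).
--
--     Examples:
--     - ("Omalizumab", "Mepolizumab") → same suffix "-mab"
--     - ("beta-blocker", "alpha-blocker") → similar pattern
--
--     Args:
--         candidates: List of cloze candidates
--
--     Returns:
--         List of (candidate1, candidate2) tuples that are similar
--     """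
--     similar_pairs = []
--
--     # Check for common suffixes (drug classes)
--     common_suffixes = ['mab', 'mib', 'nib', 'pril', 'sartan', 'olol', 'dipine', 'statin']
--
--     for i, c1 in enumerate(candidates):
--         for c2 in candidates[i+1:]:
--             # Same suffix check
--             for suffix in common_suffixes:
--                 if c1.lower().endswith(suffix) and c2.lower().endswith(suffix):
--                     similar_pairs.append((c1, c2))
--                     break
--
--             # Similar word pattern check (e.g., "Drug A", "Drug B")
--             if len(c1.split()) > 1 and len(c2.split()) > 1:
--                 c1_words = c1.split()
--                 c2_words = c2.split()
--                 # If most words match except one, they're similar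
--                 if len(c1_words) == len(c2_words):
--                     matching_words = sum(1 for w1, w2 in zip(c1_words, c2_words) if w1 == w2)
--                     if matching_words >= len(c1_words) - 1:
--                         similar_pairs.append((c1, c2))
--
--     return similar_pairs
-- ===== SOURCE B (Python) =====
-- def find_similar_cloze_pairs(candidates):
--     """Hash-and-sort version: bucket candidates by drug-class suffix and by
--     word lists with one position blanked, generate matching pairs from the
--     buckets, and emit them sorted by (i, j, match-kind)."""
--     common_suffixes = ['mab', 'mib', 'nib', 'pril', 'sartan', 'olol', 'dipine', 'statin']
--     n = len(candidates)
--     words = [c.split() for c in candidates]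
--     suf_idx = [_first_suffix_index(c.lower(), common_suffixes) for c in candidates]
--
--     events = []
--
--     # drug-suffix pairs: one bucket per suffix class (a name matches at most one)
--     for k in range(len(common_suffixes)):
--         group = [i for i in range(n) if suf_idx[i] == k]
--         events.extend((i, j, 0) for (i, j) in _all_pairs(group))
--
--     # near-identical word patterns: hash every word list on each position blanked
--     # out; a pair is charged to the position where the two word lists differ
--     # (to position 0 when they are identical), so it is generated exactly once
--     keyed = [(_blank_key(words[i], p), i)
--              for i in range(n) if len(words[i]) > 1
--              for p in range(len(words[i]))]
--     buckets = {}
--     for key, i in keyed: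
--         buckets.setdefault(key, []).append(i)
--     for (length, p, rest), idxs in buckets.items():
--         events.extend((i, j, 1) for (i, j) in _all_pairs(idxs)
--                       if p == 0 or words[i][p] != words[j][p])
--
--     events.sort()
--     return [(candidates[i], candidates[j]) for (i, j, m) in events]
--
--
-- def _first_suffix_index(low, suffixes):
--     for k, s in enumerate(suffixes):
--         if low.endswith(s):
--             return k
--     return None
--
--
-- def _blank_key(ws, p):
--     return (len(ws), p, tuple(ws[:p] + ws[p + 1:]))
--
--
-- def _all_pairs(g):
--     if not g:
--         return []
--     x, rest = g[0], g[1:]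
--     return [(x, y) for y in rest] + _all_pairs(rest)
-- ===== Notes on version B (the rewrite author's own statement) =====
-- stated objective: faster
-- what changed: A compares every pair of candidates (recomputing lower/endswith/split per pair); B computes each candidate's suffix class and word list once, buckets candidates by suffix class and by word-list-with-one-position-blanked hash keys, emits matching pairs per bucket, and sorts the matches back into A's (i, j, match-kind) order.
import Mathlib
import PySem

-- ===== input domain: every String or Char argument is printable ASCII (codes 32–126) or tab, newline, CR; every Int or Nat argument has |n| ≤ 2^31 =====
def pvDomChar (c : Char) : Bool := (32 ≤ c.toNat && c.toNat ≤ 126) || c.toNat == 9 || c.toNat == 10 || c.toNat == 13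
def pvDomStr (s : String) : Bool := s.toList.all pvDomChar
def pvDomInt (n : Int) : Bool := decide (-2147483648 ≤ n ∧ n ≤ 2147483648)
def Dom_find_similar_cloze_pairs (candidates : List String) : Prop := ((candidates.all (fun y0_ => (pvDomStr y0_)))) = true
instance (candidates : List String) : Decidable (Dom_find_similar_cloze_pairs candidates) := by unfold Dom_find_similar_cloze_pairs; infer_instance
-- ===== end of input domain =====

-- B replaces A's all-pairs scan by hashing candidates into suffix-class and blanked-word-key
-- buckets, generating matching pairs bucket-wise and sorting them back into A's (i, j) order.

-- ===== PORT A =====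
def pvCommonSuffixes : List String := ["mab", "mib", "nib", "pril", "sartan", "olol", "dipine", "statin"]

def find_similar_cloze_pairs (candidates : List String) : List (String × String) :=
  (PySem.List.enumerate candidates 0).foldl (fun acc ic =>
    (PySem.List.slice candidates (some (ic.1 + 1)) none).foldl (fun acc c2 =>
      let c1 := ic.2
      let acc1 :=
        if pvCommonSuffixes.any (fun suffix =>
            PySem.Str.endswith (PySem.Str.lower c1) suffix &&
            PySem.Str.endswith (PySem.Str.lower c2) suffix) then acc ++ [(c1, c2)]
        else acc
      if ((PySem.Str.split₀ c1).length > 1 && (PySem.Str.split₀ c2).length > 1 : Bool) then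
        let c1_words := PySem.Str.split₀ c1
        let c2_words := PySem.Str.split₀ c2
        if c1_words.length == c2_words.length then
          let matching_words : Int := ((c1_words.zip c2_words).filter (fun w => w.1 == w.2)).length
          if matching_words ≥ (c1_words.length : Int) - 1 then acc1 ++ [(c1, c2)] else acc1
        else acc1
      else acc1) acc) []

-- ===== PORT B =====
def pvAllPairs {α : Type} : List α → List (α × α)
  | [] => []
  | x :: rest => rest.map (fun y => (x, y)) ++ pvAllPairs rest

def pvFirstSuffixIndex (low : String) : Option Nat :=
  pvCommonSuffixes.findIdx? (fun s => PySem.Str.endswith low s)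

def pvBlankKey (ws : List String) (p : Nat) : Nat × Nat × List String :=
  (ws.length, p, ws.take p ++ ws.drop (p + 1))

def find_similar_cloze_pairs_alt (candidates : List String) : List (String × String) :=
  let n := candidates.length
  let words := candidates.map PySem.Str.split₀
  let sufIdx := candidates.map (fun c => pvFirstSuffixIndex (PySem.Str.lower c))
  let sufEvents := (List.range pvCommonSuffixes.length).flatMap (fun k =>
      (pvAllPairs ((List.range n).filter (fun i => sufIdx.getD i none == some k))).map
        (fun ij => (ij.1, ij.2, (0 : Nat))))
  let keyed := (List.range n).flatMap (fun i =>
      if (words.getD i []).length > 1 then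
        (List.range (words.getD i []).length).map (fun p => (pvBlankKey (words.getD i []) p, i))
      else [])
  let buckets := keyed.foldl (fun d pr => d.modify pr.1 [] (fun v => v ++ [pr.2])) PySem.Dict.empty
  let wordEvents := buckets.items.flatMap (fun kv =>
      (pvAllPairs kv.2).filterMap (fun ij =>
        if (kv.1.2.1 == 0 || !((words.getD ij.1 []).getD kv.1.2.1 "" == (words.getD ij.2 []).getD kv.1.2.1 "") : Bool)
        then some (ij.1, ij.2, (1 : Nat)) else none))
  let events := sufEvents ++ wordEvents
  -- python's `events.sort()` on int triples = stable sort by lexicographic tuple order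
  (PySem.List.sorted events (fun e => toLex (e.1, toLex (e.2.1, e.2.2)))).map
    (fun e => (candidates.getD e.1 "", candidates.getD e.2.1 ""))

-- ===== PRECONDITION & SPEC =====
def Spec_find_similar_cloze_pairs (candidates : List String) (out : List (String × String)) : Prop := out = find_similar_cloze_pairs_alt candidates
instance (candidates : List String) (out : List (String × String)) : Decidable (Spec_find_similar_cloze_pairs candidates out) := by unfold Spec_find_similar_cloze_pairs; infer_instance

-- ===== CLAIM (what is proved, stated in full; the proofs are below) =====
def Claim_equal_find_similar_cloze_pairs : Prop := ∀ (candidates : List String), Dom_find_similar_cloze_pairs candidates → Spec_find_similar_cloze_pairs candidates (find_similar_cloze_pairs candidates)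

-- ===== LEMMAS AND PROOFS =====

-- A's two per-pair tests, as Booleans
def pvCondS (c1 c2 : String) : Bool :=
  pvCommonSuffixes.any (fun s =>
    PySem.Str.endswith (PySem.Str.lower c1) s && PySem.Str.endswith (PySem.Str.lower c2) s)

def pvCondW (c1 c2 : String) : Bool :=
  ((PySem.Str.split₀ c1).length > 1 && (PySem.Str.split₀ c2).length > 1) &&
  ((PySem.Str.split₀ c1).length == (PySem.Str.split₀ c2).length) &&
  decide (((((PySem.Str.split₀ c1).zip (PySem.Str.split₀ c2)).filter (fun w => w.1 == w.2)).length : Int)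
      ≥ ((PySem.Str.split₀ c1).length : Int) - 1)

def pvKeys (cs : List String) (i j : Nat) : List (Nat × Nat × Nat) :=
  (if pvCondS (cs.getD i "") (cs.getD j "") then [(i, j, 0)] else []) ++
  (if pvCondW (cs.getD i "") (cs.getD j "") then [(i, j, 1)] else [])

def pvK (cs : List String) : List (Nat × Nat × Nat) :=
  (List.range cs.length).flatMap (fun i =>
    (List.range' (i + 1) (cs.length - (i + 1))).flatMap (pvKeys cs i))

def pvEmit (cs : List String) (e : Nat × Nat × Nat) : String × String :=
  (cs.getD e.1 "", cs.getD e.2.1 "")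

def pvKey (e : Nat × Nat × Nat) : Lex (Nat × Lex (Nat × Nat)) := toLex (e.1, toLex (e.2.1, e.2.2))

-- ------- Section 1: A in index normal form -------
def pvPairList (c1 c2 : String) : List (String × String) :=
  (if pvCondS c1 c2 then [(c1, c2)] else []) ++ (if pvCondW c1 c2 then [(c1, c2)] else [])

def pvChunk (cs : List String) (ic : Int × String) : List (String × String) :=
  (List.range' (ic.1.toNat + 1) (cs.length - (ic.1.toNat + 1))).flatMap
    (fun j => pvPairList ic.2 (cs.getD j ""))

theorem pv_enumerate_eq {α : Type} (d : α) (xs : List α) (s : Int) :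
    PySem.List.enumerate xs s = (List.range xs.length).map (fun k : Nat => (s + (k : Int), xs.getD k d)) := by
  induction xs generalizing s with
  | nil => simp [PySem.List.enumerate]
  | cons x t ih =>
    simp [PySem.List.enumerate, ih, List.range_succ_eq_map, List.map_map, Function.comp]
    intro a _; ring

theorem pv_drop_eq (cs : List String) (k : Nat) (hk : k ≤ cs.length) :
    cs.drop k = (List.range' k (cs.length - k)).map (fun j => cs.getD j "") := by
  apply List.ext_getElem
  · simp
  · intro i h1 h2
    simp [List.getElem_drop, List.getElem_range']
    rw [List.getElem?_eq_getElem (by simp at h1 ⊢; omega), Option.getD_some]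

theorem pv_body_abstract (bS b1 b2 : Bool) (P3 : Prop) [Decidable P3]
    (p : String × String) (acc : List (String × String)) :
    (let acc1 := if bS then acc ++ [p] else acc
     if b1 then (if b2 then (if P3 then acc1 ++ [p] else acc1) else acc1) else acc1)
    = acc ++ ((if bS then [p] else []) ++ (if b1 && b2 && decide P3 then [p] else [])) := by
  cases bS <;> cases b1 <;> cases b2 <;> by_cases h3 : P3 <;> simp [h3]

theorem pv_body (c1 c2 : String) (acc : List (String × String)) :
    (let acc1 := if pvCommonSuffixes.any (fun suffix =>
            PySem.Str.endswith (PySem.Str.lower c1) suffix &&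
            PySem.Str.endswith (PySem.Str.lower c2) suffix) then acc ++ [(c1, c2)]
        else acc
     if ((PySem.Str.split₀ c1).length > 1 && (PySem.Str.split₀ c2).length > 1 : Bool) then
        let c1_words := PySem.Str.split₀ c1
        let c2_words := PySem.Str.split₀ c2
        if c1_words.length == c2_words.length then
          let matching_words : Int := ((c1_words.zip c2_words).filter (fun w => w.1 == w.2)).length
          if matching_words ≥ (c1_words.length : Int) - 1 then acc1 ++ [(c1, c2)] else acc1
        else acc1
      else acc1) = acc ++ pvPairList c1 c2 := by
  unfold pvPairList pvCondS pvCondW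
  exact pv_body_abstract _ _ _ _ _ _

theorem pv_keys_map (cs : List String) (i j : Nat) :
    (pvKeys cs i j).map (pvEmit cs) = pvPairList (cs.getD i "") (cs.getD j "") := by
  unfold pvKeys pvPairList pvEmit
  split_ifs <;> simp

theorem pvA_eq (cs : List String) :
    find_similar_cloze_pairs cs = (pvK cs).map (pvEmit cs) := by
  unfold find_similar_cloze_pairs
  rw [pv_enumerate_eq ""]
  refine Eq.trans (PySem.List.foldl_congr_mem _ _ (fun acc ic => acc ++ pvChunk cs ic) _ ?_) ?_
  · intro acc ic hic
    obtain ⟨i, hi, rfl⟩ := List.mem_map.mp hic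
    have hin : i < cs.length := List.mem_range.mp hi
    show (PySem.List.slice cs (some ((0 : Int) + (i : Int) + 1)) none).foldl _ acc = _
    have h1 : ((0 : Int) + (i : Int) + 1) = (((i + 1 : Nat)) : Int) := by push_cast; ring
    rw [h1, PySem.List.slice_from_natCast, pv_drop_eq cs (i + 1) (by omega)]
    refine Eq.trans (PySem.List.foldl_congr_mem _ _
      (fun acc c2 => acc ++ pvPairList (cs.getD i "") c2) _ ?_) ?_
    · intro acc c2 _
      exact pv_body (cs.getD i "") c2 acc
    · rw [PySem.List.foldl_append_eq_flatMap, List.flatMap_map]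
      unfold pvChunk
      simp
  · rw [PySem.List.foldl_append_eq_flatMap, List.flatMap_map]
    unfold pvK
    rw [List.map_flatMap, List.nil_append]
    refine List.flatMap_congr fun i _ => ?_
    rw [List.map_flatMap]
    simp [pvChunk, pv_keys_map]

-- ------- Section 2: pairwise / nodup of the canonical key lists -------
def pvKS (cs : List String) : List (Nat × Nat × Nat) :=
  (List.range cs.length).flatMap (fun i =>
    (List.range' (i + 1) (cs.length - (i + 1))).flatMap (fun j =>
      if pvCondS (cs.getD i "") (cs.getD j "") then [(i, j, 0)] else []))

def pvKW (cs : List String) : List (Nat × Nat × Nat) :=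
  (List.range cs.length).flatMap (fun i =>
    (List.range' (i + 1) (cs.length - (i + 1))).flatMap (fun j =>
      if pvCondW (cs.getD i "") (cs.getD j "") then [(i, j, 1)] else []))

theorem pvKey_lt (e1 e2 : Nat × Nat × Nat)
    (h : e1.1 < e2.1 ∨ (e1.1 = e2.1 ∧ (e1.2.1 < e2.2.1 ∨ (e1.2.1 = e2.2.1 ∧ e1.2.2 < e2.2.2)))) :
    pvKey e1 < pvKey e2 := by
  unfold pvKey
  simp only [Prod.Lex.lt_iff, ofLex_toLex]
  tauto

theorem pv_chunk_pairwise (n : Nat) (chunk : Nat → Nat → List (Nat × Nat × Nat))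
    (hfst : ∀ i j e, e ∈ chunk i j → e.1 = i ∧ e.2.1 = j)
    (hin : ∀ i j, (chunk i j).Pairwise (fun a b => pvKey a < pvKey b)) :
    ((List.range n).flatMap (fun i =>
      (List.range' (i + 1) (n - (i + 1))).flatMap (chunk i))).Pairwise
      (fun a b => pvKey a < pvKey b) := by
  rw [List.pairwise_flatMap]
  refine ⟨fun i _ => ?_, ?_⟩
  · rw [List.pairwise_flatMap]
    refine ⟨fun j _ => hin i j, ?_⟩
    refine (List.pairwise_lt_range' 1).imp ?_
    intro j1 j2 hlt x hx y hy
    obtain ⟨hx1, hx2⟩ := hfst i j1 x hx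
    obtain ⟨hy1, hy2⟩ := hfst i j2 y hy
    exact pvKey_lt x y (Or.inr ⟨hx1.trans hy1.symm, Or.inl (by omega)⟩)
  · refine List.pairwise_lt_range.imp ?_
    intro i1 i2 hlt x hx y hy
    obtain ⟨j1, _, hx'⟩ := List.mem_flatMap.mp hx
    obtain ⟨j2, _, hy'⟩ := List.mem_flatMap.mp hy
    obtain ⟨hx1, _⟩ := hfst i1 j1 x hx'
    obtain ⟨hy1, _⟩ := hfst i2 j2 y hy'
    exact pvKey_lt x y (Or.inl (by omega))

theorem pvK_pairwise (cs : List String) :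
    (pvK cs).Pairwise (fun a b => pvKey a < pvKey b) := by
  refine pv_chunk_pairwise cs.length (pvKeys cs) ?_ ?_
  · intro i j e he
    unfold pvKeys at he
    rcases List.mem_append.mp he with h | h <;> split_ifs at h <;> simp_all
  · intro i j
    unfold pvKeys
    split_ifs <;> simp [List.pairwise_cons] <;> (apply pvKey_lt; simp)

theorem pvKS_pairwise (cs : List String) :
    (pvKS cs).Pairwise (fun a b => pvKey a < pvKey b) := by
  refine pv_chunk_pairwise cs.length _ ?_ ?_
  · intro i j e he
    split_ifs at he <;> simp_all
  · intro i j
    split_ifs <;> simp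

theorem pvKW_pairwise (cs : List String) :
    (pvKW cs).Pairwise (fun a b => pvKey a < pvKey b) := by
  refine pv_chunk_pairwise cs.length _ ?_ ?_
  · intro i j e he
    split_ifs at he <;> simp_all
  · intro i j
    split_ifs <;> simp

theorem pv_nodup_of_pairwise (l : List (Nat × Nat × Nat))
    (h : l.Pairwise (fun a b => pvKey a < pvKey b)) : l.Nodup := by
  show List.Pairwise _ _
  refine h.imp ?_
  intro a b hlt heq
  rw [heq] at hlt
  exact lt_irrefl _ hlt

-- ------- Section 3: split K into its suffix part and word part -------
theorem pv_flatMap_append_perm {α β : Type} (l : List α) (f g : α → List β) :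
    (l.flatMap (fun x => f x ++ g x)).Perm (l.flatMap f ++ l.flatMap g) := by
  induction l with
  | nil => simp
  | cons a t ih =>
    simp only [List.flatMap_cons]
    refine (ih.append_left (f a ++ g a)).trans ?_
    simp only [List.append_assoc]
    exact List.Perm.append_left _ (List.perm_append_comm_assoc _ _ _)

theorem pv_flatMap_perm_congr {α β : Type} (l : List α) (f g : α → List β)
    (h : ∀ x ∈ l, (f x).Perm (g x)) : (l.flatMap f).Perm (l.flatMap g) := by
  induction l with
  | nil => simp
  | cons a t ih =>
    simp only [List.flatMap_cons]
    exact (h a (by simp)).append (ih (fun x hx => h x (by simp [hx])))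

theorem pvK_perm_split (cs : List String) : (pvK cs).Perm (pvKS cs ++ pvKW cs) := by
  unfold pvK pvKS pvKW pvKeys
  refine (pv_flatMap_perm_congr _ _ _ (fun i _ => pv_flatMap_append_perm _ _ _)).trans
    (pv_flatMap_append_perm _ _ _)

-- ------- Section 4: membership toolbox -------
theorem pv_mem_allPairs_sublist {α : Type} (g : List α) (p : α × α) :
    p ∈ pvAllPairs g ↔ [p.1, p.2].Sublist g := by
  induction g with
  | nil => simp [pvAllPairs]
  | cons x t ih =>
    simp only [pvAllPairs, List.mem_append, List.mem_map, ih]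
    constructor
    · rintro (⟨y, hy, rfl⟩ | h)
      · exact List.cons_sublist_cons.mpr (List.singleton_sublist.mpr hy)
      · exact h.cons x
    · intro h
      rcases List.sublist_cons_iff.mp h with h | ⟨r, hr, hrs⟩
      · exact Or.inr h
      · rcases r with _ | ⟨a, rt⟩
        · simp at hr
        · simp only [List.cons.injEq] at hr
          obtain ⟨h1, h2, h3⟩ := hr
          subst h3
          left
          have hmem : p.2 ∈ t := by rw [h2]; exact List.singleton_sublist.mp hrs
          exact ⟨p.2, hmem, by rw [← h1]⟩

theorem pv_pair_sublist_iff {g : List Nat} (hg : g.Pairwise (· < ·)) (x y : Nat) :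
    [x, y].Sublist g ↔ x ∈ g ∧ y ∈ g ∧ x < y := by
  constructor
  · intro h
    have hmem := h.subset
    have hp : List.Pairwise (· < ·) [x, y] := List.Pairwise.sublist h hg
    refine ⟨hmem (by simp), hmem (by simp), ?_⟩
    exact (List.pairwise_cons.mp hp).1 y (by simp)
  · rintro ⟨hx, hy, hxy⟩
    induction g with
    | nil => simp at hx
    | cons a t ih =>
      rcases List.mem_cons.mp hx with rfl | hx'
      · have hy' : y ∈ t := by
          rcases List.mem_cons.mp hy with rfl | h'
          · omega
          · exact h'
        exact List.cons_sublist_cons.mpr (List.singleton_sublist.mpr hy')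
      · have hy' : y ∈ t := by
          rcases List.mem_cons.mp hy with rfl | h'
          · exact absurd ((List.pairwise_cons.mp hg).1 x hx') (by omega)
          · exact h'
        exact (ih (List.pairwise_cons.mp hg).2 hx' hy').cons a

theorem pv_nodup_allPairs {α : Type} (g : List α) (hg : g.Nodup) : (pvAllPairs g).Nodup := by
  induction g with
  | nil => simp [pvAllPairs]
  | cons x t ih =>
    have hx : x ∉ t := (List.nodup_cons.mp hg).1
    have ht : t.Nodup := (List.nodup_cons.mp hg).2
    refine List.Nodup.append ?_ (ih ht) ?_
    · exact ht.map (fun a b hab => by injection hab)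
    · intro p hp1 hp2
      obtain ⟨y, _, rfl⟩ := List.mem_map.mp hp1
      have := (pv_mem_allPairs_sublist t (x, y)).mp hp2
      exact hx (this.subset (by simp))

-- ------- Section 5: suffix-side equivalence -------
theorem pv_suffix_table : ∀ a < 8, ∀ b < 8, a ≠ b →
    ¬((pvCommonSuffixes.getD a "").toList <:+ (pvCommonSuffixes.getD b "").toList) := by
  decide

theorem pv_suffix_unique (c : String) (k1 k2 : Nat) (h1 : k1 < 8) (h2 : k2 < 8)
    (e1 : PySem.Str.endswith c (pvCommonSuffixes.getD k1 "") = true)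
    (e2 : PySem.Str.endswith c (pvCommonSuffixes.getD k2 "") = true) : k1 = k2 := by
  by_contra hne
  have s1 : (pvCommonSuffixes.getD k1 "").toList <:+ c.toList := by
    have := e1; simp only [PySem.Str.endswith_eq] at this
    exact (PySem.Chars.endswith_iff _ _).mp this
  have s2 : (pvCommonSuffixes.getD k2 "").toList <:+ c.toList := by
    have := e2; simp only [PySem.Str.endswith_eq] at this
    exact (PySem.Chars.endswith_iff _ _).mp this
  rcases List.suffix_or_suffix_of_suffix s1 s2 with h | h
  · exact pv_suffix_table k1 h1 k2 h2 hne h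
  · exact pv_suffix_table k2 h2 k1 h1 (Ne.symm hne) h

theorem pv_fsi_forward (c : String) (k : Nat) (h : pvFirstSuffixIndex c = some k) :
    k < 8 ∧ PySem.Str.endswith c (pvCommonSuffixes.getD k "") = true := by
  unfold pvFirstSuffixIndex pvCommonSuffixes at h
  simp only [List.findIdx?_cons, List.findIdx?_nil] at h
  split_ifs at h <;> (try cases h) <;> simp_all [pvCommonSuffixes]

theorem pv_fsi_eq_some_iff (c : String) (k : Nat) :
    pvFirstSuffixIndex c = some k ↔
      k < 8 ∧ PySem.Str.endswith c (pvCommonSuffixes.getD k "") = true := by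
  constructor
  · exact pv_fsi_forward c k
  · rintro ⟨hlt, hend⟩
    cases hfi : pvFirstSuffixIndex c with
    | none =>
      exfalso
      unfold pvFirstSuffixIndex at hfi
      have hmem : pvCommonSuffixes.getD k "" ∈ pvCommonSuffixes := by
        rw [List.getD_eq_getElem _ _ (by simpa [pvCommonSuffixes] using hlt)]
        exact List.getElem_mem _
      have hfalse := List.findIdx?_eq_none_iff.mp hfi _ hmem
      rw [hend] at hfalse
      exact Bool.noConfusion hfalse
    | some k' =>
      obtain ⟨hk8', he'⟩ := pv_fsi_forward c k' hfi
      rw [pv_suffix_unique c k k' hlt hk8' hend he']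

theorem pvCondS_iff (c1 c2 : String) :
    pvCondS c1 c2 = true ↔ ∃ k, pvFirstSuffixIndex (PySem.Str.lower c1) = some k ∧
      pvFirstSuffixIndex (PySem.Str.lower c2) = some k := by
  unfold pvCondS
  rw [List.any_eq_true]
  constructor
  · rintro ⟨s, hs, hboth⟩
    obtain ⟨k, hk, rfl⟩ := List.getElem_of_mem hs
    have hk8 : k < 8 := by simpa [pvCommonSuffixes] using hk
    rw [Bool.and_eq_true] at hboth
    have hgd : pvCommonSuffixes[k] = pvCommonSuffixes.getD k "" :=
      (List.getD_eq_getElem _ _ hk).symm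
    refine ⟨k, ?_, ?_⟩
    · exact (pv_fsi_eq_some_iff _ k).mpr ⟨hk8, by rw [← hgd]; exact hboth.1⟩
    · exact (pv_fsi_eq_some_iff _ k).mpr ⟨hk8, by rw [← hgd]; exact hboth.2⟩
  · rintro ⟨k, h1, h2⟩
    obtain ⟨hk8, he1⟩ := (pv_fsi_eq_some_iff _ k).mp h1
    obtain ⟨_, he2⟩ := (pv_fsi_eq_some_iff _ k).mp h2
    refine ⟨pvCommonSuffixes.getD k "", ?_, by rw [Bool.and_eq_true]; exact ⟨he1, he2⟩⟩
    rw [List.getD_eq_getElem _ _ (by simpa [pvCommonSuffixes] using hk8)]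
    exact List.getElem_mem _

-- ------- Section 6: word-side combinatorics -------
theorem pv_zip_all_eq (xs ys : List String) (hlen : xs.length = ys.length) :
    ((xs.zip ys).filter (fun w => w.1 == w.2)).length = xs.length ↔ xs = ys := by
  induction xs generalizing ys with
  | nil => cases ys <;> simp_all
  | cons x xs' ih =>
    cases ys with
    | nil => simp at hlen
    | cons y ys' =>
      simp only [List.length_cons, Nat.succ_inj] at hlen
      by_cases hxy : x = y
      · subst hxy
        simp [List.zip_cons_cons, List.filter_cons, ih ys' hlen]
      · have hle : ((xs'.zip ys').filter (fun w => w.1 == w.2)).length ≤ xs'.length := by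
          calc ((xs'.zip ys').filter (fun w => w.1 == w.2)).length ≤ (xs'.zip ys').length :=
                List.length_filter_le _ _
            _ ≤ xs'.length := by rw [List.length_zip]; omega
        rw [List.zip_cons_cons]
        simp [List.filter_cons, hxy]
        omega

theorem pv_near_iff (xs ys : List String) (hlen : xs.length = ys.length) :
    (xs.length - 1 ≤ ((xs.zip ys).filter (fun w => w.1 == w.2)).length) ↔
      (xs = ys ∨ ∃ p < xs.length, xs.take p = ys.take p ∧ xs.drop (p + 1) = ys.drop (p + 1) ∧
        xs.getD p "" ≠ ys.getD p "") := by
  induction xs generalizing ys with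
  | nil => cases ys <;> simp_all
  | cons x xs' ih =>
    cases ys with
    | nil => simp at hlen
    | cons y ys' =>
      simp only [List.length_cons, Nat.succ_inj] at hlen
      by_cases hxy : x = y
      · subst hxy
        have heq : ((((x, x) :: xs'.zip ys').filter (fun w => w.1 == w.2)).length)
            = ((xs'.zip ys').filter (fun w => w.1 == w.2)).length + 1 := by
          simp [List.filter_cons]
        rw [List.zip_cons_cons, heq]
        have hL : (x :: xs').length - 1 ≤ ((xs'.zip ys').filter (fun w => w.1 == w.2)).length + 1
            ↔ xs'.length - 1 ≤ ((xs'.zip ys').filter (fun w => w.1 == w.2)).length := by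
          simp only [List.length_cons]; omega
        rw [hL, ih ys' hlen]
        constructor
        · rintro (rfl | ⟨p, hp, h1, h2, h3⟩)
          · exact Or.inl rfl
          · right
            refine ⟨p + 1, ?_, ?_, ?_, ?_⟩
            · simp only [List.length_cons]; omega
            · simp only [List.take_succ_cons]; rw [h1]
            · simp only [List.drop_succ_cons]; exact h2
            · simp only [List.getD_cons_succ]; exact h3
        · rintro (h | ⟨p, hp, h1, h2, h3⟩)
          · injection h with h1 h2; exact Or.inl h2
          · cases p with
            | zero => simp at h3
            | succ p' =>
              right
              refine ⟨p', ?_, ?_, ?_, ?_⟩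
              · simp only [List.length_cons] at hp; omega
              · have := h1; simp only [List.take_succ_cons, List.cons.injEq] at this; exact this.2
              · simp only [List.drop_succ_cons] at h2; exact h2
              · simp only [List.getD_cons_succ] at h3; exact h3
      · have hc : ((((x, y) :: xs'.zip ys').filter (fun w => w.1 == w.2)).length)
            = ((xs'.zip ys').filter (fun w => w.1 == w.2)).length := by
          simp [List.filter_cons, hxy]
        rw [List.zip_cons_cons, hc]
        have hle : ((xs'.zip ys').filter (fun w => w.1 == w.2)).length ≤ xs'.length := by
          calc ((xs'.zip ys').filter (fun w => w.1 == w.2)).length ≤ (xs'.zip ys').length :=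
                List.length_filter_le _ _
            _ ≤ xs'.length := by rw [List.length_zip]; omega
        have hL : (x :: xs').length - 1 ≤ ((xs'.zip ys').filter (fun w => w.1 == w.2)).length
            ↔ ((xs'.zip ys').filter (fun w => w.1 == w.2)).length = xs'.length := by
          simp only [List.length_cons]; omega
        rw [hL, pv_zip_all_eq xs' ys' hlen]
        constructor
        · intro h
          refine Or.inr ⟨0, by simp, by simp, ?_, ?_⟩
          · simpa using h
          · simpa using hxy
        · rintro (h | ⟨p, hp, h1, h2, h3⟩)
          · cases h; rfl
          · cases p with
            | zero => simpa using h2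
            | succ p' =>
              exfalso
              have hxe : x = y := by
                have := congrArg (fun l => l.getD 0 "") h1
                simpa using this
              exact hxy hxe

theorem pv_near_bridge (xs ys : List String) (hlen : xs.length = ys.length)
    (hpos : 0 < xs.length) :
    (xs = ys ∨ ∃ p < xs.length, xs.take p = ys.take p ∧ xs.drop (p + 1) = ys.drop (p + 1) ∧
        xs.getD p "" ≠ ys.getD p "") ↔
    (∃ p < xs.length, xs.take p = ys.take p ∧ xs.drop (p + 1) = ys.drop (p + 1) ∧
        (p = 0 ∨ xs.getD p "" ≠ ys.getD p "")) := by
  constructor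
  · rintro (rfl | ⟨p, hp, h1, h2, h3⟩)
    · exact ⟨0, hpos, by simp, by simp, Or.inl rfl⟩
    · exact ⟨p, hp, h1, h2, Or.inr h3⟩
  · rintro ⟨p, hp, h1, h2, h3⟩
    rcases h3 with rfl | h3
    · by_cases hh : xs.getD 0 "" = ys.getD 0 ""
      · left
        apply List.ext_getElem hlen
        intro i hi1 hi2
        rcases Nat.eq_zero_or_pos i with rfl | hipos
        · rw [List.getD_eq_getElem _ _ hi1, List.getD_eq_getElem _ _ hi2] at hh
          exact hh
        · have := congrArg (fun l => l.getD (i - 1) "") h2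
          simp only [List.getD_eq_getElem?_getD, List.getElem?_drop] at this
          have hi' : 0 + 1 + (i - 1) = i := by omega
          rw [hi'] at this
          rw [List.getElem?_eq_getElem hi1, List.getElem?_eq_getElem hi2] at this
          simpa using this
      · exact Or.inr ⟨0, hp, h1, h2, hh⟩
    · exact Or.inr ⟨p, hp, h1, h2, h3⟩

-- ------- Section 7: B's hashed events are a permutation of the canonical key list -------
def pvWords (cs : List String) : List (List String) := cs.map PySem.Str.split₀

def pvSufIdx (cs : List String) : List (Option Nat) :=
  cs.map (fun c => pvFirstSuffixIndex (PySem.Str.lower c))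

def pvGroup (cs : List String) (k : Nat) : List Nat :=
  (List.range cs.length).filter (fun i => (pvSufIdx cs).getD i none == some k)

def pvSufEvents (cs : List String) : List (Nat × Nat × Nat) :=
  (List.range pvCommonSuffixes.length).flatMap (fun k =>
    (pvAllPairs (pvGroup cs k)).map (fun ij => (ij.1, ij.2, (0 : Nat))))

def pvKeyed (cs : List String) : List ((Nat × Nat × List String) × Nat) :=
  (List.range cs.length).flatMap (fun i =>
    if ((pvWords cs).getD i []).length > 1 then
      (List.range ((pvWords cs).getD i []).length).map
        (fun p => (pvBlankKey ((pvWords cs).getD i []) p, i))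
    else [])

def pvBuckets (cs : List String) : PySem.Dict (Nat × Nat × List String) (List Nat) :=
  (pvKeyed cs).foldl (fun d pr => d.modify pr.1 [] (fun v => v ++ [pr.2])) PySem.Dict.empty

def pvWCond (cs : List String) (p : Nat) (ij : Nat × Nat) : Bool :=
  p == 0 || !(((pvWords cs).getD ij.1 []).getD p "" == ((pvWords cs).getD ij.2 []).getD p "")

def pvWordEvents (cs : List String) : List (Nat × Nat × Nat) :=
  (pvBuckets cs).items.flatMap (fun kv =>
    (pvAllPairs kv.2).filterMap (fun ij =>
      if pvWCond cs kv.1.2.1 ij then some (ij.1, ij.2, (1 : Nat)) else none))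

theorem pvB_decomp (cs : List String) :
    find_similar_cloze_pairs_alt cs =
      (PySem.List.sorted (pvSufEvents cs ++ pvWordEvents cs)
        (fun e => toLex (e.1, toLex (e.2.1, e.2.2)))).map
        (fun e => (cs.getD e.1 "", cs.getD e.2.1 "")) := rfl

theorem pv_getD_map {α : Type} (f : String → α) (cs : List String) (i : Nat) (h : i < cs.length) (d : α) :
    (cs.map f).getD i d = f (cs.getD i "") := by
  rw [List.getD_eq_getElem _ _ (by simpa using h), List.getElem_map, List.getD_eq_getElem _ _ h]

theorem pv_group_pairwise (cs : List String) (k : Nat) : (pvGroup cs k).Pairwise (· < ·) :=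
  List.Pairwise.sublist (List.filter_sublist) List.pairwise_lt_range

theorem pv_mem_group (cs : List String) (k i : Nat) :
    i ∈ pvGroup cs k ↔ i < cs.length ∧
      pvFirstSuffixIndex (PySem.Str.lower (cs.getD i "")) = some k := by
  unfold pvGroup
  rw [List.mem_filter, List.mem_range]
  constructor
  · rintro ⟨h1, h2⟩
    refine ⟨h1, ?_⟩
    unfold pvSufIdx at h2
    rw [pv_getD_map _ _ _ h1 none] at h2
    exact beq_iff_eq.mp h2
  · rintro ⟨h1, h2⟩
    refine ⟨h1, ?_⟩
    unfold pvSufIdx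
    rw [pv_getD_map _ _ _ h1 none]
    exact beq_iff_eq.mpr h2

theorem pv_mem_sufEvents (cs : List String) (e : Nat × Nat × Nat) :
    e ∈ pvSufEvents cs ↔ ∃ k i j, i ∈ pvGroup cs k ∧ j ∈ pvGroup cs k ∧ i < j ∧ e = (i, j, 0) := by
  unfold pvSufEvents
  simp only [List.mem_flatMap, List.mem_map, List.mem_range]
  constructor
  · rintro ⟨k, _, ij, hij, rfl⟩
    have h3 := (pv_pair_sublist_iff (pv_group_pairwise cs k) ij.1 ij.2).mp
      ((pv_mem_allPairs_sublist _ ij).mp hij)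
    exact ⟨k, ij.1, ij.2, h3.1, h3.2.1, h3.2.2, rfl⟩
  · rintro ⟨k, i, j, hi, hj, hij, rfl⟩
    have hk8 : k < 8 := (pv_fsi_forward _ _ ((pv_mem_group cs k i).mp hi).2).1
    refine ⟨k, by simpa [pvCommonSuffixes] using hk8, (i, j), ?_, rfl⟩
    exact (pv_mem_allPairs_sublist _ (i, j)).mpr
      ((pv_pair_sublist_iff (pv_group_pairwise cs k) i j).mpr ⟨hi, hj, hij⟩)

theorem pv_mem_KS (cs : List String) (e : Nat × Nat × Nat) :
    e ∈ pvKS cs ↔ ∃ i j, i < j ∧ j < cs.length ∧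
      pvCondS (cs.getD i "") (cs.getD j "") = true ∧ e = (i, j, 0) := by
  unfold pvKS
  simp only [List.mem_flatMap, List.mem_range, List.mem_range'_1]
  constructor
  · rintro ⟨i, hi, j, hj, he⟩
    by_cases hc : pvCondS (cs.getD i "") (cs.getD j "") = true
    · simp only [hc, if_true, List.mem_singleton] at he
      exact ⟨i, j, by omega, by omega, hc, he⟩
    · simp only [hc, if_false, List.not_mem_nil] at he
      exact absurd he (by simp)
  · rintro ⟨i, j, h1, h2, hc, rfl⟩
    refine ⟨i, by omega, j, by omega, ?_⟩
    rw [if_pos hc]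
    simp

theorem pv_KS_mem_iff (cs : List String) (e : Nat × Nat × Nat) :
    e ∈ pvKS cs ↔ e ∈ pvSufEvents cs := by
  rw [pv_mem_KS, pv_mem_sufEvents]
  constructor
  · rintro ⟨i, j, hij, hjn, hc, rfl⟩
    obtain ⟨k, h1, h2⟩ := (pvCondS_iff _ _).mp hc
    exact ⟨k, i, j, (pv_mem_group cs k i).mpr ⟨by omega, h1⟩,
      (pv_mem_group cs k j).mpr ⟨hjn, h2⟩, hij, rfl⟩
  · rintro ⟨k, i, j, hi, hj, hij, rfl⟩
    obtain ⟨hin, h1⟩ := (pv_mem_group cs k i).mp hi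
    obtain ⟨hjn, h2⟩ := (pv_mem_group cs k j).mp hj
    exact ⟨i, j, hij, hjn, (pvCondS_iff _ _).mpr ⟨k, h1, h2⟩, rfl⟩

theorem pv_nodup_sufEvents (cs : List String) : (pvSufEvents cs).Nodup := by
  unfold pvSufEvents
  rw [List.nodup_flatMap]
  constructor
  · intro k _
    refine List.Nodup.map ?_ (pv_nodup_allPairs _ ((List.nodup_range).filter _))
    intro a b hab
    simp only [Prod.mk.injEq] at hab
    exact Prod.ext hab.1 hab.2.1
  · refine List.pairwise_lt_range.imp ?_
    intro k1 k2 hlt e he1 he2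
    obtain ⟨ij1, hij1, rfl⟩ := List.mem_map.mp he1
    obtain ⟨ij2, hij2, heq⟩ := List.mem_map.mp he2
    have hm1 : ij1.1 ∈ pvGroup cs k1 :=
      ((pv_mem_allPairs_sublist _ ij1).mp hij1).subset (by simp)
    have hm2 : ij2.1 ∈ pvGroup cs k2 :=
      ((pv_mem_allPairs_sublist _ ij2).mp hij2).subset (by simp)
    have h1 := ((pv_mem_group cs k1 ij1.1).mp hm1).2
    have h2 := ((pv_mem_group cs k2 ij2.1).mp hm2).2
    have : ij2.1 = ij1.1 := by
      have := congrArg (fun x => x.1) heq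
      simpa using this
    rw [this, h1] at h2
    have : k1 = k2 := by injection h2
    omega

theorem pv_KS_perm (cs : List String) : (pvKS cs).Perm (pvSufEvents cs) :=
  (List.perm_ext_iff_of_nodup (pv_nodup_of_pairwise _ (pvKS_pairwise cs))
    (pv_nodup_sufEvents cs)).mpr (fun e => pv_KS_mem_iff cs e)

def pvBMatch (cs : List String) (key : Nat × Nat × List String) (i : Nat) : Bool :=
  decide (1 < ((pvWords cs).getD i []).length) &&
  decide (key.2.1 < ((pvWords cs).getD i []).length) &&
  (pvBlankKey ((pvWords cs).getD i []) key.2.1 == key)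

theorem pv_range_filter_eq (n c : Nat) :
    (List.range n).filter (fun p => p == c) = if c < n then [c] else [] := by
  induction n with
  | zero => simp
  | succ n ih =>
    rw [List.range_succ, List.filter_append, ih]
    by_cases hc : c = n
    · subst hc
      simp
    · have : (n == c) = false := by simp [Ne.symm hc]
      simp only [List.filter_cons, this, List.filter_nil]
      split_ifs <;> simp_all <;> omega

theorem pv_range_filter_blank (w : List String) (key : Nat × Nat × List String) :
    (List.range w.length).filter (fun p => pvBlankKey w p == key) =
      if key.2.1 < w.length ∧ pvBlankKey w key.2.1 = key then [key.2.1] else [] := by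
  have hpt : ∀ p ∈ List.range w.length,
      (pvBlankKey w p == key) = ((p == key.2.1) && (pvBlankKey w key.2.1 == key)) := by
    intro p _
    by_cases hp : p = key.2.1
    · subst hp; simp
    · have hne : pvBlankKey w p ≠ key := by
        intro h
        apply hp
        have := congrArg (fun x => x.2.1) h
        simpa [pvBlankKey] using this
      rw [show (pvBlankKey w p == key) = false from beq_eq_false_iff_ne.mpr hne,
        show (p == key.2.1) = false from beq_eq_false_iff_ne.mpr hp, Bool.false_and]
  rw [List.filter_congr hpt]
  by_cases hb : pvBlankKey w key.2.1 = key
  · have hb' : (pvBlankKey w key.2.1 == key) = true := beq_iff_eq.mpr hb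
    simp only [hb', Bool.and_true]
    rw [pv_range_filter_eq]
    by_cases h2 : key.2.1 < w.length
    · rw [if_pos h2, if_pos ⟨h2, hb⟩]
    · rw [if_neg h2, if_neg (fun h => h2 h.1)]
  · have hb' : (pvBlankKey w key.2.1 == key) = false := by simp [hb]
    rw [if_neg (fun h => hb h.2)]
    simp [hb']

theorem pv_keyed_filter (cs : List String) (key : Nat × Nat × List String) :
    (pvKeyed cs).filter (fun pr => pr.1 == key) =
      ((List.range cs.length).filter (pvBMatch cs key)).map (fun i => (key, i)) := by
  unfold pvKeyed
  rw [List.filter_flatMap]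
  have hblock : ∀ i ∈ List.range cs.length,
      (List.filter (fun pr => pr.1 == key)
        (if ((pvWords cs).getD i []).length > 1 then
          (List.range ((pvWords cs).getD i []).length).map
            (fun p => (pvBlankKey ((pvWords cs).getD i []) p, i))
        else [])) = if pvBMatch cs key i then [(key, i)] else [] := by
    intro i _
    by_cases hlen : ((pvWords cs).getD i []).length > 1
    · rw [if_pos hlen, List.filter_map]
      have : ((fun pr => pr.1 == key) ∘ (fun p => (pvBlankKey ((pvWords cs).getD i []) p, i)))
          = fun p => (pvBlankKey ((pvWords cs).getD i []) p == key) := rfl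
      rw [this, pv_range_filter_blank]
      unfold pvBMatch
      by_cases hc : key.2.1 < ((pvWords cs).getD i []).length ∧
          pvBlankKey ((pvWords cs).getD i []) key.2.1 = key
      · have hm : (decide (1 < ((pvWords cs).getD i []).length) &&
            decide (key.2.1 < ((pvWords cs).getD i []).length) &&
            (pvBlankKey ((pvWords cs).getD i []) key.2.1 == key)) = true := by
          rw [Bool.and_eq_true, Bool.and_eq_true]
          exact ⟨⟨decide_eq_true hlen, decide_eq_true hc.1⟩, beq_iff_eq.mpr hc.2⟩
        rw [if_pos hc, if_pos hm]
        simp only [List.map_cons, List.map_nil]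
        rw [hc.2]
      · have hm : (decide (1 < ((pvWords cs).getD i []).length) &&
            decide (key.2.1 < ((pvWords cs).getD i []).length) &&
            (pvBlankKey ((pvWords cs).getD i []) key.2.1 == key)) = false := by
          rcases not_and_or.mp hc with h | h
          · rw [decide_eq_false h, Bool.and_false, Bool.false_and]
          · rw [beq_eq_false_iff_ne.mpr h, Bool.and_false]
        rw [if_neg hc, if_neg (by rw [hm]; exact Bool.noConfusion : ¬(_ = true))]
        simp
    · rw [if_neg hlen]
      unfold pvBMatch
      have hm : (decide (1 < ((pvWords cs).getD i []).length) &&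
          decide (key.2.1 < ((pvWords cs).getD i []).length) &&
          (pvBlankKey ((pvWords cs).getD i []) key.2.1 == key)) = false := by
        rw [decide_eq_false hlen, Bool.false_and, Bool.false_and]
      rw [if_neg (by rw [hm]; exact Bool.noConfusion : ¬(_ = true))]
      simp
  rw [List.flatMap_congr hblock]
  induction (List.range cs.length) with
  | nil => simp
  | cons a t ih =>
    simp only [List.flatMap_cons, List.filter_cons, ih]
    by_cases h : pvBMatch cs key a = true <;> simp [h]

theorem pv_bucket_eq (cs : List String) (key : Nat × Nat × List String) :
    (pvBuckets cs).getD key [] = (List.range cs.length).filter (pvBMatch cs key) := by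
  unfold pvBuckets
  rw [PySem.Dict.getD_foldl_modify_append, pv_keyed_filter]
  simp [List.map_map, Function.comp]

theorem pv_mem_buckets_keys (cs : List String) (key : Nat × Nat × List String) :
    key ∈ (pvBuckets cs).keys ↔ ∃ pr ∈ pvKeyed cs, pr.1 = key := by
  unfold pvBuckets
  rw [PySem.Dict.keys_foldl_modify_key, PySem.Dict.keys_empty]
  rw [show PySem.Set.update ([] : List (Nat × Nat × List String))
      ((pvKeyed cs).map Prod.fst) = PySem.Set.ofList ((pvKeyed cs).map Prod.fst) from rfl]
  rw [PySem.Set.mem_ofList, List.mem_map]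

theorem pv_nodup_keys (cs : List String) : (pvBuckets cs).keys.Nodup := by
  unfold pvBuckets
  exact PySem.Dict.nodup_keys_foldl_modify_key _ _ _ _ _ PySem.Dict.nodup_keys_empty

theorem pv_mem_keyed (cs : List String) (pr : (Nat × Nat × List String) × Nat) :
    pr ∈ pvKeyed cs ↔ pr.2 < cs.length ∧ 1 < ((pvWords cs).getD pr.2 []).length ∧
      ∃ p < ((pvWords cs).getD pr.2 []).length, pr.1 = pvBlankKey ((pvWords cs).getD pr.2 []) p := by
  unfold pvKeyed
  simp only [List.mem_flatMap, List.mem_range]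
  constructor
  · rintro ⟨i, hi, hpr⟩
    by_cases hlen : ((pvWords cs).getD i []).length > 1
    · rw [if_pos hlen] at hpr
      obtain ⟨p, hp, rfl⟩ := List.mem_map.mp hpr
      exact ⟨hi, hlen, p, List.mem_range.mp hp, rfl⟩
    · rw [if_neg hlen] at hpr
      cases hpr
  · rintro ⟨h2, hlen, p, hp, hkey⟩
    refine ⟨pr.2, h2, ?_⟩
    rw [if_pos hlen]
    refine List.mem_map.mpr ⟨p, List.mem_range.mpr hp, ?_⟩
    exact Prod.ext hkey.symm rfl

theorem pv_mem_bucket (cs : List String) (key : Nat × Nat × List String) (i : Nat) :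
    i ∈ (pvBuckets cs).getD key [] ↔ i < cs.length ∧ pvBMatch cs key i = true := by
  rw [pv_bucket_eq, List.mem_filter, List.mem_range]

theorem pv_bucket_pairwise (cs : List String) (key : Nat × Nat × List String) :
    ((pvBuckets cs).getD key []).Pairwise (· < ·) := by
  rw [pv_bucket_eq]
  exact List.Pairwise.sublist (List.filter_sublist) List.pairwise_lt_range

theorem pv_mem_wordEvents (cs : List String) (e : Nat × Nat × Nat) :
    e ∈ pvWordEvents cs ↔ ∃ key ∈ (pvBuckets cs).keys, ∃ i j : Nat,
      i ∈ (pvBuckets cs).getD key [] ∧ j ∈ (pvBuckets cs).getD key [] ∧ i < j ∧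
      pvWCond cs key.2.1 (i, j) = true ∧ e = (i, j, 1) := by
  unfold pvWordEvents
  rw [PySem.Dict.items_eq_map_keys _ (pv_nodup_keys cs) []]
  simp only [List.mem_flatMap, List.mem_map, List.mem_filterMap]
  constructor
  · rintro ⟨kv, ⟨key, hkey, rfl⟩, ij, hij, hsome⟩
    by_cases hc : pvWCond cs key.2.1 ij = true
    · rw [if_pos hc] at hsome
      have he : (ij.1, ij.2, 1) = e := by injection hsome
      have hsub := (pv_pair_sublist_iff (pv_bucket_pairwise cs key) ij.1 ij.2).mp
        ((pv_mem_allPairs_sublist _ ij).mp hij)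
      refine ⟨key, hkey, ij.1, ij.2, hsub.1, hsub.2.1, hsub.2.2, ?_, he.symm⟩
      rwa [Prod.mk.eta]
    · rw [if_neg hc] at hsome
      cases hsome
  · rintro ⟨key, hkey, i, j, hi, hj, hij, hc, rfl⟩
    refine ⟨(key, (pvBuckets cs).getD key []), ⟨key, hkey, rfl⟩, (i, j), ?_, ?_⟩
    · exact (pv_mem_allPairs_sublist _ (i, j)).mpr
        ((pv_pair_sublist_iff (pv_bucket_pairwise cs key) i j).mpr ⟨hi, hj, hij⟩)
    · rw [if_pos hc]

theorem pv_blank_eq_iff (xs ys : List String) (p : Nat) :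
    pvBlankKey xs p = pvBlankKey ys p ↔ xs.length = ys.length ∧
      xs.take p = ys.take p ∧ xs.drop (p + 1) = ys.drop (p + 1) := by
  unfold pvBlankKey
  rw [Prod.ext_iff, Prod.ext_iff]
  constructor
  · rintro ⟨h1, _, h3⟩
    have hlen : xs.length = ys.length := h1
    have htl : (xs.take p).length = (ys.take p).length := by simp [hlen]
    obtain ⟨ht, hd⟩ := List.append_inj h3 htl
    exact ⟨hlen, ht, hd⟩
  · rintro ⟨h1, h2, h3⟩
    exact ⟨h1, rfl, by rw [h2, h3]⟩

theorem pv_condW_iff (cs : List String) (i j : Nat) (hin : i < cs.length) (hjn : j < cs.length) :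
    pvCondW (cs.getD i "") (cs.getD j "") = true ↔
      ∃ key, pvBMatch cs key i = true ∧ pvBMatch cs key j = true ∧
        pvWCond cs key.2.1 (i, j) = true := by
  have hwi : (pvWords cs).getD i [] = PySem.Str.split₀ (cs.getD i "") := pv_getD_map _ _ _ hin []
  have hwj : (pvWords cs).getD j [] = PySem.Str.split₀ (cs.getD j "") := pv_getD_map _ _ _ hjn []
  unfold pvCondW
  rw [Bool.and_eq_true, Bool.and_eq_true, Bool.and_eq_true]
  constructor
  · rintro ⟨⟨⟨ha1, ha2⟩, hb⟩, hc⟩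
    have hl1 : 1 < (PySem.Str.split₀ (cs.getD i "")).length := of_decide_eq_true ha1
    have hl2 : 1 < (PySem.Str.split₀ (cs.getD j "")).length := of_decide_eq_true ha2
    have hlen : (PySem.Str.split₀ (cs.getD i "")).length
        = (PySem.Str.split₀ (cs.getD j "")).length := beq_iff_eq.mp hb
    have hcnt : (PySem.Str.split₀ (cs.getD i "")).length - 1 ≤
        (((PySem.Str.split₀ (cs.getD i "")).zip (PySem.Str.split₀ (cs.getD j ""))).filter
          (fun w => w.1 == w.2)).length := by
      have := of_decide_eq_true hc
      omega
    obtain ⟨p, hp, ht, hd, hor⟩ :=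
      (pv_near_bridge _ _ hlen (by omega)).mp ((pv_near_iff _ _ hlen).mp hcnt)
    refine ⟨pvBlankKey (PySem.Str.split₀ (cs.getD i "")) p, ?_, ?_, ?_⟩
    · unfold pvBMatch
      rw [hwi]
      have hk : (pvBlankKey (PySem.Str.split₀ (cs.getD i "")) p).2.1 = p := rfl
      rw [hk, decide_eq_true hl1, decide_eq_true hp]
      simp
    · unfold pvBMatch
      rw [hwj]
      have hk : (pvBlankKey (PySem.Str.split₀ (cs.getD i "")) p).2.1 = p := rfl
      rw [hk, decide_eq_true hl2, decide_eq_true (show p < (PySem.Str.split₀ (cs.getD j "")).length by rw [← hlen]; exact hp)]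
      have hbe : pvBlankKey (PySem.Str.split₀ (cs.getD j "")) p
          = pvBlankKey (PySem.Str.split₀ (cs.getD i "")) p :=
        (pv_blank_eq_iff _ _ p).mpr ⟨hlen.symm, ht.symm, hd.symm⟩
      rw [hbe]
      simp
    · unfold pvWCond
      have hk : (pvBlankKey (PySem.Str.split₀ (cs.getD i "")) p).2.1 = p := rfl
      rw [hk]
      rcases hor with rfl | hne
      · simp
      · rw [hwi, hwj]
        have : ((PySem.Str.split₀ (cs.getD i "")).getD p ""
            == (PySem.Str.split₀ (cs.getD j "")).getD p "") = false := beq_eq_false_iff_ne.mpr hne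
        rw [this]
        simp
  · rintro ⟨key, hmi, hmj, hcond⟩
    unfold pvBMatch at hmi hmj
    rw [Bool.and_eq_true, Bool.and_eq_true] at hmi hmj
    obtain ⟨⟨hi1, hi2⟩, hi3⟩ := hmi
    obtain ⟨⟨hj1, hj2⟩, hj3⟩ := hmj
    rw [hwi] at hi1 hi2 hi3
    rw [hwj] at hj1 hj2 hj3
    have hl1 : 1 < (PySem.Str.split₀ (cs.getD i "")).length := of_decide_eq_true hi1
    have hl2 : 1 < (PySem.Str.split₀ (cs.getD j "")).length := of_decide_eq_true hj1
    have hp1 : key.2.1 < (PySem.Str.split₀ (cs.getD i "")).length := of_decide_eq_true hi2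
    have hbe : pvBlankKey (PySem.Str.split₀ (cs.getD i "")) key.2.1
        = pvBlankKey (PySem.Str.split₀ (cs.getD j "")) key.2.1 :=
      (beq_iff_eq.mp hi3).trans (beq_iff_eq.mp hj3).symm
    obtain ⟨hlen, ht, hd⟩ := (pv_blank_eq_iff _ _ _).mp hbe
    have hor : key.2.1 = 0 ∨ (PySem.Str.split₀ (cs.getD i "")).getD key.2.1 ""
        ≠ (PySem.Str.split₀ (cs.getD j "")).getD key.2.1 "" := by
      unfold pvWCond at hcond
      rw [Bool.or_eq_true] at hcond
      rcases hcond with h | h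
      · exact Or.inl (by simpa using h)
      · right
        rw [hwi, hwj] at h
        simpa using h
    have hcnt := (pv_near_iff _ _ hlen).mpr
      ((pv_near_bridge _ _ hlen (by omega)).mpr ⟨key.2.1, hp1, ht, hd, hor⟩)
    refine ⟨⟨⟨decide_eq_true hl1, decide_eq_true hl2⟩, beq_iff_eq.mpr hlen⟩, ?_⟩
    rw [decide_eq_true_eq]
    push_cast
    omega

theorem pv_mem_KW (cs : List String) (e : Nat × Nat × Nat) :
    e ∈ pvKW cs ↔ ∃ i j, i < j ∧ j < cs.length ∧
      pvCondW (cs.getD i "") (cs.getD j "") = true ∧ e = (i, j, 1) := by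
  unfold pvKW
  simp only [List.mem_flatMap, List.mem_range, List.mem_range'_1]
  constructor
  · rintro ⟨i, hi, j, hj, he⟩
    by_cases hc : pvCondW (cs.getD i "") (cs.getD j "") = true
    · simp only [hc, if_true, List.mem_singleton] at he
      exact ⟨i, j, by omega, by omega, hc, he⟩
    · simp only [hc, if_false] at he
      exact absurd he (by simp)
  · rintro ⟨i, j, h1, h2, hc, rfl⟩
    refine ⟨i, by omega, j, by omega, ?_⟩
    rw [if_pos hc]
    simp

theorem pv_KW_mem_iff (cs : List String) (e : Nat × Nat × Nat) :
    e ∈ pvKW cs ↔ e ∈ pvWordEvents cs := by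
  rw [pv_mem_KW, pv_mem_wordEvents]
  constructor
  · rintro ⟨i, j, hij, hjn, hc, rfl⟩
    obtain ⟨key, hmi, hmj, hcond⟩ := (pv_condW_iff cs i j (by omega) hjn).mp hc
    have hkey : key ∈ (pvBuckets cs).keys := by
      rw [pv_mem_buckets_keys]
      refine ⟨(key, i), ?_, rfl⟩
      rw [pv_mem_keyed]
      have hmi' := hmi
      unfold pvBMatch at hmi'
      rw [Bool.and_eq_true, Bool.and_eq_true] at hmi'
      obtain ⟨⟨h1, h2⟩, h3⟩ := hmi'
      exact ⟨by omega, of_decide_eq_true h1, key.2.1, of_decide_eq_true h2,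
        (beq_iff_eq.mp h3).symm⟩
    refine ⟨key, hkey, i, j, ?_, ?_, hij, hcond, rfl⟩
    · rw [pv_mem_bucket]; exact ⟨by omega, hmi⟩
    · rw [pv_mem_bucket]; exact ⟨hjn, hmj⟩
  · rintro ⟨key, hkey, i, j, hi, hj, hij, hcond, rfl⟩
    obtain ⟨hin, hmi⟩ := (pv_mem_bucket cs key i).mp hi
    obtain ⟨hjn, hmj⟩ := (pv_mem_bucket cs key j).mp hj
    exact ⟨i, j, hij, hjn, (pv_condW_iff cs i j hin hjn).mpr ⟨key, hmi, hmj, hcond⟩, rfl⟩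

theorem pv_eq_of_two_blanks (xs ys : List String) (hlen : xs.length = ys.length)
    (p1 p2 : Nat) (hne : p1 ≠ p2)
    (t1 : xs.take p1 = ys.take p1) (d1 : xs.drop (p1 + 1) = ys.drop (p1 + 1))
    (t2 : xs.take p2 = ys.take p2) (d2 : xs.drop (p2 + 1) = ys.drop (p2 + 1)) : xs = ys := by
  have keyt : ∀ q p, (xs.take p = ys.take p) → q < p → xs[q]? = ys[q]? := by
    intro q p ht hlt
    have := congrArg (fun l => l[q]?) ht
    simpa [List.getElem?_take, hlt] using this
  have keyd : ∀ q p, (xs.drop (p + 1) = ys.drop (p + 1)) → p < q → xs[q]? = ys[q]? := by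
    intro q p hd hlt
    have := congrArg (fun l => l[q - (p + 1)]?) hd
    simp only [List.getElem?_drop] at this
    have hq : p + 1 + (q - (p + 1)) = q := by omega
    rwa [hq] at this
  apply List.ext_getElem?
  intro q
  rcases Nat.lt_trichotomy q p1 with h | h | h
  · exact keyt q p1 t1 h
  · subst h
    rcases Nat.lt_or_ge q p2 with h2 | h2
    · exact keyt q p2 t2 h2
    · exact keyd q p2 d2 (by omega)
  · exact keyd q p1 d1 h

theorem pv_no_two_keys (cs : List String) (k1 k2 : Nat × Nat × List String) (i j : Nat)
    (hb_i1 : pvBMatch cs k1 i = true) (hb_j1 : pvBMatch cs k1 j = true)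
    (hb_i2 : pvBMatch cs k2 i = true) (hb_j2 : pvBMatch cs k2 j = true)
    (hc1 : pvWCond cs k1.2.1 (i, j) = true) (hc2 : pvWCond cs k2.2.1 (i, j) = true) :
    k1 = k2 := by
  unfold pvBMatch at hb_i1 hb_j1 hb_i2 hb_j2
  rw [Bool.and_eq_true, Bool.and_eq_true] at hb_i1 hb_j1 hb_i2 hb_j2
  have e_i1 := beq_iff_eq.mp hb_i1.2
  have e_j1 := beq_iff_eq.mp hb_j1.2
  have e_i2 := beq_iff_eq.mp hb_i2.2
  have e_j2 := beq_iff_eq.mp hb_j2.2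
  by_cases hpp : k1.2.1 = k2.2.1
  · rw [← e_i1, ← e_i2, hpp]
  · exfalso
    obtain ⟨hlen1, ht1, hd1⟩ := (pv_blank_eq_iff _ _ _).mp (e_i1.trans e_j1.symm)
    obtain ⟨_, ht2, hd2⟩ := (pv_blank_eq_iff _ _ _).mp (e_i2.trans e_j2.symm)
    have hw : (pvWords cs).getD i [] = (pvWords cs).getD j [] :=
      pv_eq_of_two_blanks _ _ hlen1 k1.2.1 k2.2.1 hpp ht1 hd1 ht2 hd2
    have hz1 : k1.2.1 = 0 := by
      unfold pvWCond at hc1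
      rw [Bool.or_eq_true] at hc1
      rcases hc1 with h | h
      · simpa using h
      · rw [hw] at h; simp at h
    have hz2 : k2.2.1 = 0 := by
      unfold pvWCond at hc2
      rw [Bool.or_eq_true] at hc2
      rcases hc2 with h | h
      · simpa using h
      · rw [hw] at h; simp at h
    exact hpp (hz1.trans hz2.symm)

theorem pv_nodup_wordEvents (cs : List String) : (pvWordEvents cs).Nodup := by
  unfold pvWordEvents
  rw [PySem.Dict.items_eq_map_keys _ (pv_nodup_keys cs) []]
  rw [List.nodup_flatMap]
  constructor
  · intro kv hkv
    obtain ⟨key, hkey, rfl⟩ := List.mem_map.mp hkv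
    refine List.Nodup.filterMap ?_ (pv_nodup_allPairs _ ?_)
    · intro a a' b hb hb'
      rw [Option.mem_def] at hb hb'
      by_cases h1 : pvWCond cs key.2.1 a = true
      case neg => rw [if_neg h1] at hb; cases hb
      by_cases h2 : pvWCond cs key.2.1 a' = true
      case neg => rw [if_neg h2] at hb'; cases hb'
      rw [if_pos h1] at hb
      rw [if_pos h2] at hb'
      injection hb with hb
      injection hb' with hb'
      have h := hb'.trans hb.symm
      simp only [Prod.mk.injEq] at h
      exact Prod.ext h.1.symm h.2.1.symm
    · refine ((pv_bucket_pairwise cs key).imp ?_ : List.Pairwise _ _)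
      intro a b hab
      omega
  · refine List.Pairwise.map _ ?_ (pv_nodup_keys cs)
    intro k1 k2 hne e he1 he2
    obtain ⟨ij1, hij1, hsome1⟩ := List.mem_filterMap.mp he1
    obtain ⟨ij2, hij2, hsome2⟩ := List.mem_filterMap.mp he2
    by_cases hc1 : pvWCond cs k1.2.1 ij1 = true
    case neg => rw [if_neg hc1] at hsome1; cases hsome1
    by_cases hc2 : pvWCond cs k2.2.1 ij2 = true
    case neg => rw [if_neg hc2] at hsome2; cases hsome2
    rw [if_pos hc1] at hsome1
    rw [if_pos hc2] at hsome2
    have hij_eq : ij1 = ij2 := by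
      have h1 : (ij1.1, ij1.2, 1) = e := by injection hsome1
      have h2 : (ij2.1, ij2.2, 1) = e := by injection hsome2
      have := h1.trans h2.symm
      simp only [Prod.mk.injEq] at this
      exact Prod.ext this.1 this.2.1
    have hmem1 := (pv_pair_sublist_iff (pv_bucket_pairwise cs k1) ij1.1 ij1.2).mp
      ((pv_mem_allPairs_sublist _ ij1).mp hij1)
    have hmem2 := (pv_pair_sublist_iff (pv_bucket_pairwise cs k2) ij2.1 ij2.2).mp
      ((pv_mem_allPairs_sublist _ ij2).mp hij2)
    rw [← hij_eq] at hmem2 hc2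
    have hb_i1 := ((pv_mem_bucket cs k1 ij1.1).mp hmem1.1).2
    have hb_j1 := ((pv_mem_bucket cs k1 ij1.2).mp hmem1.2.1).2
    have hb_i2 := ((pv_mem_bucket cs k2 ij1.1).mp hmem2.1).2
    have hb_j2 := ((pv_mem_bucket cs k2 ij1.2).mp hmem2.2.1).2
    refine hne (pv_no_two_keys cs k1 k2 ij1.1 ij1.2 hb_i1 hb_j1 hb_i2 hb_j2 ?_ ?_)
    · rwa [Prod.mk.eta]
    · rwa [Prod.mk.eta]

theorem pv_KW_perm (cs : List String) : (pvKW cs).Perm (pvWordEvents cs) :=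
  (List.perm_ext_iff_of_nodup (pv_nodup_of_pairwise _ (pvKW_pairwise cs))
    (pv_nodup_wordEvents cs)).mpr (fun e => pv_KW_mem_iff cs e)

theorem pvB_eq (cs : List String) :
    find_similar_cloze_pairs_alt cs = (pvK cs).map (pvEmit cs) := by
  rw [pvB_decomp]
  have hperm : (pvK cs).Perm (pvSufEvents cs ++ pvWordEvents cs) :=
    (pvK_perm_split cs).trans ((pv_KS_perm cs).append (pv_KW_perm cs))
  rw [PySem.List.sorted_eq_of_perm_of_pairwise_lt _ _
    (fun e => toLex (e.1, toLex (e.2.1, e.2.2))) hperm (by exact pvK_pairwise cs)]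
  rfl

-- ===== VERDICT (by name: the statement is the Claim_ definition above) =====
theorem find_similar_cloze_pairs_spec : Claim_equal_find_similar_cloze_pairs := by
  intro candidates _
  unfold Spec_find_similar_cloze_pairs
  rw [pvA_eq, pvB_eq]
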